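-- pv_equiv track=rewrite | github.com/NestorVil/PY119-Practice-Problems | 13.py | can_be_rearranged
-- ===== SOURCE A (Python) =====
-- def can_be_rearranged(str1, str2):
--     """
--     Checks if some characters in str1 can be rearranged to match str2.
--
--     Args:
--         str1: The first string.
--         str2: The second string.
--
--     Returns:
--         True if a portion of str1 can be rearranged to match str2, False otherwise.
--     """
--
--     # Create a dictionary to store character counts in str1
--     char_counts = {}
--     for char in str1:
--         char_counts[char] = char_counts.get(char, 0) + 1
--
--     # Iterate through str2 and decrement character counts in the dictionary
--     for char in str2:
--         if char in char_counts and char_counts[char] > 0: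
--             char_counts[char] -= 1
--         else:
--             return False
--
--     # If all characters in str2 were found and decremented, return True
--     return True
-- ===== SOURCE B (Python) =====
-- def can_be_rearranged(str1, str2):
--     """Sort both strings, then check with one greedy merge scan that sorted(str2)
--     is a subsequence of sorted(str1) (equivalent to multiset containment)."""
--     haystack = sorted(str1)
--     needle = sorted(str2)
--     i = 0
--     for c in needle:
--         while i < len(haystack) and haystack[i] != c:
--             i += 1
--         if i == len(haystack):
--             return False
--         i += 1
--     return True
-- ===== Notes on version B (the rewrite author's own statement) =====
-- stated objective: alternative
-- what changed: Replaces A's character-count dictionary and consuming decrement loop with sorting both strings and a single greedy merge scan that checks sorted(str2) is a subsequence of sorted(str1).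
import Mathlib
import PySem

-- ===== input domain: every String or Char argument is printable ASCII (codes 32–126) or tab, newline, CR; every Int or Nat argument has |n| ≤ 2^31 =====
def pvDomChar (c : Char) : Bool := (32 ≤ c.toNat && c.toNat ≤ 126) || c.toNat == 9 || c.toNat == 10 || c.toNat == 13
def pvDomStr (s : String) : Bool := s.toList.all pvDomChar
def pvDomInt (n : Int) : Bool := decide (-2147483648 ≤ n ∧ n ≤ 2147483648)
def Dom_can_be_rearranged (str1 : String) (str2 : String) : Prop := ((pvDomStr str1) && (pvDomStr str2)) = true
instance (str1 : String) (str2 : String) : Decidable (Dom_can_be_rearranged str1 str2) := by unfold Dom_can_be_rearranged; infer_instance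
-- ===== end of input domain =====

-- B replaces A's character-count dictionary and consuming decrement loop with sorting both
-- strings and one greedy merge scan checking sorted(str2) is a subsequence of sorted(str1)
-- (alternative algorithm; same result).

-- ===== PORT A =====
-- the second loop of A: walk str2, decrement counts, early return False
def pvCanLoop (d : PySem.Dict Char Int) : List Char → Bool
  | [] => true
  | c :: rest =>
      if d.contains c && decide (0 < d.getD c 0) then
        pvCanLoop (d.insert c (d.getD c 0 - 1)) rest
      else
        false

def can_be_rearranged (str1 : String) (str2 : String) : Bool :=
  -- first loop: char_counts[char] = char_counts.get(char, 0) + 1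
  let char_counts :=
    str1.toList.foldl (fun d ch => d.insert ch (d.getD ch 0 + 1)) PySem.Dict.empty
  pvCanLoop char_counts str2.toList

-- ===== PORT B =====
-- Source B's scan: 'for c in needle: advance i past non-matching haystack chars; fail at the end;
-- else consume'. The index i into haystack is represented by the remaining haystack suffix.
def pvScan : List Char → List Char → Bool
  | [], _ => true                      -- needle exhausted: True
  | _ :: _, [] => false                -- i == len(haystack): return False
  | c :: cs, d :: ds =>
      if d == c then pvScan cs ds      -- match: consume both (i += 1, next c)
      else pvScan (c :: cs) ds         -- haystack[i] != c: i += 1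

def can_be_rearranged_alt (str1 : String) (str2 : String) : Bool :=
  let haystack := PySem.List.sorted str1.toList (fun x => x) false
  let needle := PySem.List.sorted str2.toList (fun x => x) false
  pvScan needle haystack

-- ===== PRECONDITION & SPEC =====
def Spec_can_be_rearranged (str1 : String) (str2 : String) (out : Bool) : Prop := out = can_be_rearranged_alt str1 str2
instance (str1 : String) (str2 : String) (out : Bool) : Decidable (Spec_can_be_rearranged str1 str2 out) := by unfold Spec_can_be_rearranged; infer_instance

-- ===== CLAIM (what is proved, stated in full; the proofs are below) =====
def Claim_equal_can_be_rearranged : Prop := ∀ (str1 : String) (str2 : String), Dom_can_be_rearranged str1 str2 → Spec_can_be_rearranged str1 str2 (can_be_rearranged str1 str2)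

-- ===== LEMMAS AND PROOFS =====

-- A's loop succeeds iff every character's multiplicity in the remaining str2 fits the
-- (possibly already decremented) counter d, provided all stored counts are nonnegative.
theorem pvCanLoop_iff (cs : List Char) : ∀ (d : PySem.Dict Char Int),
    (∀ c : Char, 0 ≤ d.getD c 0) →
    (pvCanLoop d cs = true ↔ ∀ c : Char, (cs.count c : Int) ≤ d.getD c 0) := by
  induction cs with
  | nil =>
      intro d hd
      simp only [pvCanLoop, List.count_nil, Nat.cast_zero, true_iff]
      exact hd
  | cons c rest ih =>
      intro d hd
      have hcond : (d.contains c && decide (0 < d.getD c 0)) = decide (0 < d.getD c 0) := by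
        cases hc : d.contains c with
        | true => simp
        | false => simp [PySem.Dict.getD_of_not_contains d 0 hc]
      rw [pvCanLoop, hcond]
      by_cases hpos : 0 < d.getD c 0
      · have hd' : ∀ c' : Char, 0 ≤ (d.insert c (d.getD c 0 - 1)).getD c' 0 := by
          intro c'
          rw [PySem.Dict.getD_insert]
          by_cases hc' : c' = c
          · simp only [hc', if_true]; omega
          · simp only [hc', if_false]; exact hd c'
        simp only [hpos, decide_true, if_true, ih _ hd']
        constructor
        · intro h c'
          have hh := h c'
          rw [PySem.Dict.getD_insert] at hh
          by_cases hc' : c' = c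
          · subst hc'
            simp only [if_true, List.count_cons_self] at hh ⊢
            push_cast
            omega
          · simp only [hc', if_false] at hh
            rw [List.count_cons_of_ne (a := c') (b := c) (Ne.symm hc')]
            exact hh
        · intro h c'
          have hh := h c'
          rw [PySem.Dict.getD_insert]
          by_cases hc' : c' = c
          · subst hc'
            simp only [if_true]
            rw [List.count_cons_self] at hh
            push_cast at hh ⊢
            omega
          · simp only [hc', if_false]
            rw [List.count_cons_of_ne (a := c') (b := c) (Ne.symm hc')] at hh
            exact hh
      · simp only [hpos, decide_false, Bool.false_eq_true, if_false, false_iff]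
        intro h
        have hh := h c
        rw [List.count_cons_self] at hh
        push_cast at hh
        omega

-- the greedy scan decides the sublist (subsequence) relation
theorem pvScan_iff_sublist (ys : List Char) : ∀ xs : List Char,
    pvScan xs ys = true ↔ List.Sublist xs ys := by
  induction ys with
  | nil =>
      intro xs
      cases xs with
      | nil => simp [pvScan]
      | cons c cs => simp [pvScan]
  | cons d ds ih =>
      intro xs
      cases xs with
      | nil => simp [pvScan, List.nil_sublist]
      | cons c cs =>
          rw [pvScan]
          by_cases hcd : d = c
          · subst hcd
            simp only [beq_self_eq_true, if_true, ih cs]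
            exact (List.cons_sublist_cons).symm
          · have : (d == c) = false := by simp [hcd]
            rw [this]
            simp only [Bool.false_eq_true, if_false, ih (c :: cs)]
            constructor
            · intro h; exact h.cons d
            · intro h
              cases h with
              | cons _ h' => exact h'
              | cons₂ _ _ => exact absurd rfl hcd

-- B succeeds iff str2's characters form a sub-multiset of str1's
theorem alt_iff (str1 str2 : String) :
    can_be_rearranged_alt str1 str2 = true ↔
      ∀ c : Char, str2.toList.count c ≤ str1.toList.count c := by
  unfold can_be_rearranged_alt
  rw [pvScan_iff_sublist]
  constructor
  · intro h c
    have hsub : List.Subperm (PySem.List.sorted str2.toList (fun x => x) false)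
        (PySem.List.sorted str1.toList (fun x => x) false) := h.subperm
    have hp : List.Subperm str2.toList str1.toList := by
      have h1 := (PySem.List.sorted_perm str1.toList (fun x => x) false)
      have h2 := (PySem.List.sorted_perm str2.toList (fun x => x) false)
      exact h1.subperm_left.mp (h2.subperm_right.mp hsub)
    by_cases hc : c ∈ str2.toList
    · exact List.subperm_ext_iff.mp hp c hc
    · simp [List.count_eq_zero.mpr hc]
  · intro h
    have hp : List.Subperm str2.toList str1.toList :=
      List.subperm_ext_iff.mpr (fun c _ => h c)
    have hsub : List.Subperm (PySem.List.sorted str2.toList (fun x => x) false)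
        (PySem.List.sorted str1.toList (fun x => x) false) := by
      have h1 := (PySem.List.sorted_perm str1.toList (fun x => x) false)
      have h2 := (PySem.List.sorted_perm str2.toList (fun x => x) false)
      exact h2.subperm_right.mpr (h1.subperm_left.mpr hp)
    exact List.sublist_of_subperm_of_pairwise hsub
      (PySem.List.sorted_pairwise str2.toList (fun x => x))
      (PySem.List.sorted_pairwise str1.toList (fun x => x))

-- ===== VERDICT (by name: the statement is the Claim_ definition above) =====
theorem can_be_rearranged_spec : Claim_equal_can_be_rearranged := by
  intro str1 str2 _
  unfold Spec_can_be_rearranged can_be_rearranged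
  rw [PySem.Dict.foldl_insert_getD_add_one_eq_counter]
  have hd : ∀ c : Char, 0 ≤ (PySem.Dict.counter str1.toList).getD c 0 := by
    intro c; rw [PySem.Dict.getD_counter]; exact Int.natCast_nonneg _
  have hiff : pvCanLoop (PySem.Dict.counter str1.toList) str2.toList = true ↔
      can_be_rearranged_alt str1 str2 = true := by
    rw [pvCanLoop_iff _ _ hd, alt_iff]
    constructor <;> intro h c <;> have hh := h c
    · rw [PySem.Dict.getD_counter] at hh; exact_mod_cast hh
    · rw [PySem.Dict.getD_counter]; exact_mod_cast hh
  cases hA : pvCanLoop (PySem.Dict.counter str1.toList) str2.toList with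
  | true => exact (hiff.mp hA).symm
  | false =>
      cases hB : can_be_rearranged_alt str1 str2 with
      | true => exact absurd (hiff.mpr hB) (by simp [hA])
      | false => rfl
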